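-- pv_equiv track=rewrite | github.com/Tactique/common | database/sql_scripts/seeders/game_engine.py | clean_lined_csv
-- ===== SOURCE A (Python) =====
-- def clean_lined_csv(raw_csv):
--     line_broken = raw_csv.split('\n')
--     lines = []
--     for line in line_broken:
--         entries = line.split(',')
--         entries = map(lambda x: x.strip(), entries)
--         line = ','.join(entries)
--         lines.append(line)
--     return '\n'.join(lines)
-- ===== SOURCE B (Python) =====
-- def clean_lined_csv(raw_csv):
--     # Single left-to-right pass: delimiters pass through, leading whitespace of a
--     # field is skipped, interior whitespace is buffered and flushed only when a
--     # non-space character follows, so trailing whitespace is dropped.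
--     out = []
--     ws = []             # buffered whitespace inside the current field
--     in_field = False    # a non-space character of the current field has been seen
--     for ch in raw_csv:
--         if ch in ',\n':
--             out.append(ch)
--             ws.clear()
--             in_field = False
--         elif ch.isspace():
--             if in_field:
--                 ws.append(ch)
--         else:
--             out.extend(ws)
--             ws.clear()
--             out.append(ch)
--             in_field = True
--     return ''.join(out)
-- ===== Notes on version B (the rewrite author's own statement) =====
-- stated objective: alternative
-- what changed: Replaced the split-on-newline / split-on-comma / strip / join pipeline with a single character-by-character pass that copies delimiters through, skips leading field whitespace and buffers interior whitespace so a trailing run is dropped.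
import Mathlib
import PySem

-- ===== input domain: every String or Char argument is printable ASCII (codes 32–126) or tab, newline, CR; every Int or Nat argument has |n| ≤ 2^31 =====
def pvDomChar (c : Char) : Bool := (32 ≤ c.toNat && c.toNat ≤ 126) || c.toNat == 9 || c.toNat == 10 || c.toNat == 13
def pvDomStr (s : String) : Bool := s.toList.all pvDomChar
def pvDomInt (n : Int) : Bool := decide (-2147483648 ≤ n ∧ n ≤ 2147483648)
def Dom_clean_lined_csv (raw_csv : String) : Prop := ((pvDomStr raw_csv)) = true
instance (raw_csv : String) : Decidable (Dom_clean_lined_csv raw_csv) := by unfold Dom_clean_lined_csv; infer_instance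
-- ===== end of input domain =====

-- B replaces A's split/strip/join pipeline by one character pass with a whitespace buffer (alternative algorithm, same cost).

-- ===== PORT A =====
def clean_lined_csv (raw_csv : String) : String :=
  let line_broken := PySem.Chars.splitOn raw_csv.toList ['\n']
  let lines : List (List Char) := line_broken.foldl
    (fun lines line =>
      let entries := PySem.Chars.splitOn line [',']
      let entries := entries.map PySem.Chars.strip
      let line := PySem.Chars.join [','] entries
      lines ++ [line]) []
  String.mk (PySem.Chars.join ['\n'] lines)

-- ===== PORT B =====
-- the loop body of Source B: state (out, ws, in_field)
def pvStepB (st : List Char × List Char × Bool) (ch : Char) : List Char × List Char × Bool :=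
  if ch = ',' ∨ ch = '\n' then (st.1 ++ [ch], [], false)
  else if PySem.Chars.isspace ch then
    (if st.2.2 then (st.1, st.2.1 ++ [ch], true) else st)
  else (st.1 ++ st.2.1 ++ [ch], [], true)

def clean_lined_csv_alt (raw_csv : String) : String :=
  String.mk (raw_csv.toList.foldl pvStepB ([], [], false)).1

-- ===== PRECONDITION & SPEC =====
def Spec_clean_lined_csv (raw_csv : String) (out : String) : Prop := out = clean_lined_csv_alt raw_csv
instance (raw_csv : String) (out : String) : Decidable (Spec_clean_lined_csv raw_csv out) := by unfold Spec_clean_lined_csv; infer_instance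

-- ===== CLAIM (what is proved, stated in full; the proofs are below) =====
def Claim_equal_clean_lined_csv : Prop := ∀ (raw_csv : String), Dom_clean_lined_csv raw_csv → Spec_clean_lined_csv raw_csv (clean_lined_csv raw_csv)

-- ===== LEMMAS AND PROOFS =====

-- structural single-character split, and the proof that Chars.splitOn computes it
def splitD (d : Char) : List Char → List (List Char)
  | [] => [[]]
  | c :: rest => if c = d then [] :: splitD d rest else (splitD d rest).modifyHead (c :: ·)

theorem splitD_ne_nil (d : Char) (l : List Char) : splitD d l ≠ [] := by
  cases l with
  | nil => simp [splitD]
  | cons c rest =>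
    simp only [splitD]
    split
    · simp
    · cases h : splitD d rest with
      | nil => exact absurd h (splitD_ne_nil d rest)
      | cons a t => simp

theorem splitOn_go_spec (d : Char) (fuel : Nat) (l cur : List Char) (acc : List (List Char))
    (h : l.length ≤ fuel) :
    PySem.Chars.splitOn.go [d] fuel l cur acc
      = acc.reverse ++ (splitD d l).modifyHead (cur.reverse ++ ·) := by
  induction fuel generalizing l cur acc with
  | zero =>
    interval_cases hl : l.length
    · rw [List.length_eq_zero_iff] at hl; subst hl
      simp [PySem.Chars.splitOn.go, splitD]
  | succ fuel ih =>
    cases l with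
    | nil => simp [PySem.Chars.splitOn.go, splitD]
    | cons c rest =>
      by_cases hc : c = d
      · subst hc
        have : ([c].isPrefixOf (c :: rest)) = true := by simp [List.isPrefixOf]
        rw [PySem.Chars.splitOn.go]
        simp only [this, if_pos]
        rw [show List.drop [c].length (c :: rest) = rest by simp]
        rw [ih rest [] (cur.reverse :: acc) (by simpa using Nat.le_of_succ_le_succ h)]
        have hne := splitD_ne_nil c rest
        cases hsd : splitD c rest with
        | nil => exact absurd hsd hne
        | cons a t => simp [splitD, hsd]
      · have : ([d].isPrefixOf (c :: rest)) = false := by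
          simp [List.isPrefixOf]; exact fun h' => (hc h'.symm).elim
        rw [PySem.Chars.splitOn.go]
        simp only [this, Bool.false_eq_true, if_false]
        rw [ih rest (c :: cur) acc (by simpa using Nat.le_of_succ_le_succ h)]
        have hne := splitD_ne_nil d rest
        cases hsd : splitD d rest with
        | nil => exact absurd hsd hne
        | cons a t => simp [splitD, hc, hsd, List.append_assoc]

theorem splitOn_single (d : Char) (l : List Char) :
    PySem.Chars.splitOn l [d] = splitD d l := by
  have hne := splitD_ne_nil d l
  rw [PySem.Chars.splitOn, splitOn_go_spec d _ l [] [] (Nat.le_succ _)]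
  cases hsd : splitD d l with
  | nil => exact absurd hsd hne
  | cons a t => simp

-- splitD on an append whose first part is free of the separator
theorem splitD_append_of_not_mem (d : Char) (pre l : List Char) (h : d ∉ pre) :
    splitD d (pre ++ l) = (splitD d l).modifyHead (pre ++ ·) := by
  induction pre with
  | nil =>
    have hne := splitD_ne_nil d l
    cases hsd : splitD d l with
    | nil => exact absurd hsd hne
    | cons a t => simp [hsd]
  | cons c pre ih =>
    have hcd : c ≠ d := fun hc => h (by simp [hc])
    have hpre : d ∉ pre := fun hm => h (by simp [hm])
    simp only [List.cons_append, splitD, hcd, if_false, ih hpre]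
    have hne := splitD_ne_nil d l
    cases hsd : splitD d l with
    | nil => exact absurd hsd hne
    | cons a t => simp

theorem splitD_of_not_mem (d : Char) (l : List Char) (h : d ∉ l) : splitD d l = [l] := by
  have := splitD_append_of_not_mem d l [] h
  simpa [splitD] using this

theorem splitD_sep (d : Char) (pre rest : List Char) (h : d ∉ pre) :
    splitD d (pre ++ d :: rest) = pre :: splitD d rest := by
  rw [splitD_append_of_not_mem d pre _ h]
  have hne := splitD_ne_nil d rest
  simp only [splitD, if_pos]
  simp

-- list-level versions of the two pipelines
def cleanLine (line : List Char) : List Char :=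
  PySem.Chars.join [','] ((splitD ',' line).map PySem.Chars.strip)

def cleanA (l : List Char) : List Char :=
  PySem.Chars.join ['\n'] ((splitD '\n' l).map cleanLine)

def cleanB (l : List Char) : List Char := (l.foldl pvStepB ([], [], false)).1

theorem foldl_append_eq_map (f : List Char → List Char) (l : List (List Char)) (acc : List (List Char)) :
    l.foldl (fun lines line => lines ++ [f line]) acc = acc ++ l.map f := by
  induction l generalizing acc with
  | nil => simp
  | cons x xs ih => simp [ih, List.append_assoc]

theorem clean_lined_csv_eq (s : String) : clean_lined_csv s = String.mk (cleanA s.toList) := by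
  unfold clean_lined_csv cleanA cleanLine
  simp only [splitOn_single, foldl_append_eq_map, List.nil_append]

-- join with a nonempty first piece split off
theorem join_append_head (sep a b : List Char) (xs : List (List Char)) :
    PySem.Chars.join sep ((a ++ b) :: xs) = a ++ PySem.Chars.join sep (b :: xs) := by
  cases xs with
  | nil => simp [PySem.Chars.join, List.intercalate]
  | cons y ys =>
    rw [PySem.Chars.join_cons_cons, PySem.Chars.join_cons_cons]
    simp [List.append_assoc]

-- whitespace suffix of a list
def wsSuffix (l : List Char) : List Char := (l.reverse.takeWhile PySem.Chars.isspace).reverse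

theorem rstrip_append_wsSuffix (l : List Char) : PySem.Chars.rstrip l ++ wsSuffix l = l := by
  unfold PySem.Chars.rstrip wsSuffix
  rw [← List.reverse_append, List.takeWhile_append_dropWhile, List.reverse_reverse]

theorem rstrip_concat_space (l : List Char) (c : Char) (h : PySem.Chars.isspace c = true) :
    PySem.Chars.rstrip (l ++ [c]) = PySem.Chars.rstrip l := by
  simp [PySem.Chars.rstrip, h]

theorem rstrip_concat_nonspace (l : List Char) (c : Char) (h : PySem.Chars.isspace c = false) :
    PySem.Chars.rstrip (l ++ [c]) = l ++ [c] := by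
  simp [PySem.Chars.rstrip, h]

theorem lstrip_concat (l : List Char) (c : Char) :
    PySem.Chars.lstrip (l ++ [c]) =
      if PySem.Chars.lstrip l = [] then PySem.Chars.lstrip [c] else PySem.Chars.lstrip l ++ [c] := by
  unfold PySem.Chars.lstrip
  rw [List.dropWhile_append]
  split_ifs with h1 h2 h3
  · rfl
  · rw [List.isEmpty_iff] at h1; exact absurd h1 h2
  · rw [List.isEmpty_iff.mpr h3] at h1; simp at h1
  · rfl

-- the invariant of B's fold over a delimiter-free segment
theorem foldB_segment (pre : List Char) (hc : ',' ∉ pre) (hn : '\n' ∉ pre) :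
    pre.foldl pvStepB ([], [], false)
      = (PySem.Chars.strip pre, wsSuffix (PySem.Chars.lstrip pre),
         decide (PySem.Chars.lstrip pre ≠ [])) := by
  induction pre using List.reverseRecOn with
  | nil => simp [PySem.Chars.strip, PySem.Chars.lstrip, PySem.Chars.rstrip, wsSuffix]
  | append_singleton l c ih =>
    have hc' : ',' ∉ l := fun h => hc (by simp [h])
    have hn' : '\n' ∉ l := fun h => hn (by simp [h])
    have hcc : c ≠ ',' := fun h => hc (by simp [h])
    have hcn : c ≠ '\n' := fun h => hn (by simp [h])
    rw [List.foldl_append, ih hc' hn']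
    simp only [List.foldl_cons, List.foldl_nil]
    unfold pvStepB
    rw [if_neg (by simp [hcc, hcn])]
    by_cases hsp : PySem.Chars.isspace c = true
    · rw [if_pos hsp]
      by_cases hl : PySem.Chars.lstrip l = []
      · have hstrip : PySem.Chars.strip (l ++ [c]) = PySem.Chars.strip l := by
          unfold PySem.Chars.strip
          rw [lstrip_concat, if_pos hl, hl]
          simp [PySem.Chars.lstrip, hsp]
        have hls : PySem.Chars.lstrip (l ++ [c]) = [] := by
          rw [lstrip_concat, if_pos hl]; simp [PySem.Chars.lstrip, hsp]
        simp [hl, hls, hstrip, wsSuffix]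
      · have hls : PySem.Chars.lstrip (l ++ [c]) = PySem.Chars.lstrip l ++ [c] := by
          rw [lstrip_concat, if_neg hl]
        have hstrip : PySem.Chars.strip (l ++ [c]) = PySem.Chars.strip l := by
          unfold PySem.Chars.strip
          rw [hls, rstrip_concat_space _ _ hsp]
        simp only [decide_eq_true_eq]
        rw [if_pos (by simp [hl])]
        simp [hstrip, hls, wsSuffix, hsp, hl]
    · have hsp' : PySem.Chars.isspace c = false := by simpa using hsp
      rw [if_neg (by simp [hsp'])]
      have hls : PySem.Chars.lstrip (l ++ [c]) = PySem.Chars.lstrip l ++ [c] := by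
        rw [lstrip_concat]
        split_ifs with hl
        · rw [hl]; simp [PySem.Chars.lstrip, hsp']
        · rfl
      have hstrip : PySem.Chars.strip (l ++ [c])
          = PySem.Chars.strip l ++ wsSuffix (PySem.Chars.lstrip l) ++ [c] := by
        unfold PySem.Chars.strip
        rw [hls, rstrip_concat_nonspace _ _ hsp', rstrip_append_wsSuffix]
      simp [hstrip, hls, wsSuffix, hsp']

-- out-component of B's fold is accumulated by appending
theorem pvStepB_out (o ws : List Char) (b : Bool) (c : Char) :
    pvStepB (o, ws, b) c = (o ++ (pvStepB ([], ws, b) c).1, (pvStepB ([], ws, b) c).2) := by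
  unfold pvStepB
  split_ifs <;> simp [List.append_assoc]

theorem foldB_out_prefix (l : List Char) (o ws : List Char) (b : Bool) :
    l.foldl pvStepB (o, ws, b)
      = (o ++ (l.foldl pvStepB ([], ws, b)).1, (l.foldl pvStepB ([], ws, b)).2) := by
  induction l generalizing o ws b with
  | nil => simp
  | cons c rest ih =>
    rcases h : pvStepB ([], ws, b) c with ⟨u1, u2, u3⟩
    have h2 : pvStepB (o, ws, b) c = (o ++ u1, u2, u3) := by rw [pvStepB_out, h]
    simp only [List.foldl_cons, h, h2]
    rw [ih (o ++ u1) u2 u3, ih u1 u2 u3]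
    simp [List.append_assoc]

-- B over a delimiter-free segment followed by a delimiter
theorem cleanB_sep (pre rest : List Char) (hc : ',' ∉ pre) (hn : '\n' ∉ pre)
    (d : Char) (hd : d = ',' ∨ d = '\n') :
    cleanB (pre ++ d :: rest) = PySem.Chars.strip pre ++ d :: cleanB rest := by
  unfold cleanB
  rw [List.foldl_append, foldB_segment pre hc hn]
  simp only [List.foldl_cons]
  rw [show pvStepB (PySem.Chars.strip pre, wsSuffix (PySem.Chars.lstrip pre),
        decide (PySem.Chars.lstrip pre ≠ [])) d
      = (PySem.Chars.strip pre ++ [d], [], false) by unfold pvStepB; rw [if_pos hd]]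
  rw [foldB_out_prefix]
  simp

theorem cleanB_nodelim (l : List Char) (hc : ',' ∉ l) (hn : '\n' ∉ l) :
    cleanB l = PySem.Chars.strip l := by
  unfold cleanB
  rw [foldB_segment l hc hn]

theorem cleanLine_nodelim (l : List Char) (hc : ',' ∉ l) :
    cleanLine l = PySem.Chars.strip l := by
  unfold cleanLine
  rw [splitD_of_not_mem ',' l hc]
  simp [PySem.Chars.join, List.intercalate]

theorem cleanLine_sep (pre rest : List Char) (hc : ',' ∉ pre) :
    cleanLine (pre ++ ',' :: rest) = PySem.Chars.strip pre ++ ',' :: cleanLine rest := by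
  unfold cleanLine
  rw [splitD_sep ',' pre rest hc]
  have hne := splitD_ne_nil ',' rest
  cases hsd : splitD ',' rest with
  | nil => exact absurd hsd hne
  | cons a t =>
    rw [List.map_cons, List.map_cons, PySem.Chars.join_cons_cons]
    simp [PySem.Chars.join]

theorem cleanA_newline (pre rest : List Char) (hn : '\n' ∉ pre) :
    cleanA (pre ++ '\n' :: rest) = cleanLine pre ++ '\n' :: cleanA rest := by
  unfold cleanA
  rw [splitD_sep '\n' pre rest hn]
  have hne := splitD_ne_nil '\n' rest
  cases hsd : splitD '\n' rest with
  | nil => exact absurd hsd hne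
  | cons a t =>
    rw [List.map_cons, List.map_cons, PySem.Chars.join_cons_cons]
    simp [PySem.Chars.join]

theorem cleanA_comma (pre rest : List Char) (hc : ',' ∉ pre) (hn : '\n' ∉ pre) :
    cleanA (pre ++ ',' :: rest) = PySem.Chars.strip pre ++ ',' :: cleanA rest := by
  unfold cleanA
  have hne := splitD_ne_nil '\n' rest
  cases hsd : splitD '\n' rest with
  | nil => exact absurd hsd hne
  | cons r1 rs =>
    have : splitD '\n' (pre ++ ',' :: rest) = (pre ++ ',' :: r1) :: rs := by
      rw [show (pre ++ ',' :: rest) = (pre ++ [',']) ++ rest by simp,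
          splitD_append_of_not_mem '\n' (pre ++ [',']) rest (by simp [hn]), hsd]
      simp
    rw [this, List.map_cons, List.map_cons]
    rw [cleanLine_sep pre r1 hc, join_append_head,
        show (',' :: cleanLine r1) = [','] ++ cleanLine r1 from rfl, join_append_head]
    simp

theorem cleanA_nodelim (l : List Char) (hc : ',' ∉ l) (hn : '\n' ∉ l) :
    cleanA l = PySem.Chars.strip l := by
  unfold cleanA
  rw [splitD_of_not_mem '\n' l hn]
  simp only [List.map_cons, List.map_nil]
  rw [cleanLine_nodelim l hc]
  simp [PySem.Chars.join, List.intercalate]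

def pvIsDelim (c : Char) : Bool := c = ',' || c = '\n'

theorem cleanA_eq_cleanB (n : Nat) (l : List Char) (h : l.length ≤ n) : cleanA l = cleanB l := by
  induction n generalizing l with
  | zero =>
    have : l = [] := List.length_eq_zero_iff.mp (Nat.le_zero.mp h)
    subst this
    simp [cleanA_nodelim, cleanB_nodelim]
  | succ n ih =>
    have hdecomp := List.takeWhile_append_dropWhile (p := fun c => !pvIsDelim c) (l := l)
    set pre := l.takeWhile (fun c => !pvIsDelim c) with hpre
    have hprefree : ∀ c ∈ pre, pvIsDelim c = false := by
      intro c hcm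
      have := List.mem_takeWhile_imp hcm
      simpa using this
    have hcpre : ',' ∉ pre := fun hm => by simpa [pvIsDelim] using hprefree ',' hm
    have hnpre : '\n' ∉ pre := fun hm => by simpa [pvIsDelim] using hprefree '\n' hm
    cases hsuf : l.dropWhile (fun c => !pvIsDelim c) with
    | nil =>
      rw [hsuf] at hdecomp
      have hl : l = pre := by rw [← hdecomp]; simp
      rw [hl, cleanA_nodelim pre hcpre hnpre, cleanB_nodelim pre hcpre hnpre]
    | cons d rest =>
      rw [hsuf] at hdecomp
      have hd : pvIsDelim d = true := by
        have h2 := List.head_dropWhile_not (p := fun c => !pvIsDelim c) (l := l)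
          (by rw [hsuf]; simp)
        simp only [hsuf, List.head_cons] at h2
        simpa using h2
      have hd' : d = ',' ∨ d = '\n' := by
        simpa [pvIsDelim] using hd
      have hlen : rest.length ≤ n := by
        have : l.length = pre.length + (rest.length + 1) := by
          rw [← hdecomp]; simp
        omega
      have hrec := ih rest hlen
      rw [← hdecomp]
      rcases hd' with hd' | hd' <;> subst hd'
      · rw [cleanA_comma pre rest hcpre hnpre,
            cleanB_sep pre rest hcpre hnpre ',' (Or.inl rfl), hrec]
      · rw [cleanA_newline pre rest hnpre, cleanLine_nodelim pre hcpre,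
            cleanB_sep pre rest hcpre hnpre '\n' (Or.inr rfl), hrec]

-- ===== VERDICT (by name: the statement is the Claim_ definition above) =====
theorem clean_lined_csv_spec : Claim_equal_clean_lined_csv := by
  intro raw_csv _
  unfold Spec_clean_lined_csv
  rw [clean_lined_csv_eq]
  show String.mk (cleanA raw_csv.toList) = String.mk (cleanB raw_csv.toList)
  rw [cleanA_eq_cleanB raw_csv.toList.length raw_csv.toList (le_refl _)]
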